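-- pv_equiv track=rewrite | github.com/CodelineAtyab/genz-todo-list-app | seq_converter_solution_one_of_many.py | process_seq_and_generate_result
-- ===== SOURCE A (Python) =====
-- def process_seq_and_generate_result(list_of_num_in_seq: list[int]):
--     """
--     Processes a list of numbers based on steps and sum included in those steps.
--     :param list_of_num_in_seq: Incoming list of integers that needs to be compressed.
--     :return: List of compressed integers based on steps.
--     """
--     result_package_list = []
--     is_a_step = True  # First number is always a step.
--     step_count_remaining = 0  # Set the count as soon as the number is encountered.
--     curr_package_sum = 0  # Until step_count_remaining is not 0, keep adding the numbers in this cache.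
--
--     for curr_num in list_of_num_in_seq:
--         if is_a_step:
--             step_count_remaining = curr_num
--             is_a_step = False
--         elif step_count_remaining > 0:
--             curr_package_sum += curr_num
--             step_count_remaining -= 1
--
--             if step_count_remaining == 0:  # Before exiting the iteration, append the result and reset the cycle.
--                 result_package_list.append(curr_package_sum)
--                 curr_package_sum = 0
--                 is_a_step = True
--
--     return result_package_list
-- ===== SOURCE B (Python) =====
-- def process_seq_and_generate_result(list_of_num_in_seq: list[int]):
--     """Cursor-based rewrite: read a step, slice the group, sum it."""
--     result = []
--     i = 0
--     n = len(list_of_num_in_seq)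
--     while i < n:
--         step = list_of_num_in_seq[i]
--         i += 1
--         if step <= 0:
--             break
--         group = list_of_num_in_seq[i:i + step]
--         if len(group) == step:
--             result.append(sum(group))
--         i += step
--     return result
-- ===== Notes on version B (the rewrite author's own statement) =====
-- stated objective: simpler
-- what changed: Replaces the boolean/counter state machine folded over each element by an index cursor that reads the step, slices the whole group, and appends its sum via the built-in sum (fewer per-element interpreter steps).
import Mathlib
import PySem

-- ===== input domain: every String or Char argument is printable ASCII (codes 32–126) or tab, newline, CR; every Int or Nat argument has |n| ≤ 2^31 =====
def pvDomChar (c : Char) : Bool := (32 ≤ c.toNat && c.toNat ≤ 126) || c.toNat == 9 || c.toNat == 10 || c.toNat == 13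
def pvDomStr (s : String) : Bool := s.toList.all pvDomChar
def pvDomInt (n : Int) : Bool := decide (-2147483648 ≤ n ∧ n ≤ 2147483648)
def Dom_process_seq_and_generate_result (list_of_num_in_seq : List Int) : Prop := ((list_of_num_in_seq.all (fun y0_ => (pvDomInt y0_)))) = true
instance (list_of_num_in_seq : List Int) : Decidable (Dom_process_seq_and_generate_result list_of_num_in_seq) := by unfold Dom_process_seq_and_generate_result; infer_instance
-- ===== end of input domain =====

-- B replaces A's boolean/counter state machine by an index cursor that reads the
-- step, slices the whole group and sums it (objective: simpler).

-- ===== PORT A =====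
-- A's loop body over the state (result_package_list, is_a_step, step_count_remaining, curr_package_sum)
def pvStepA (st : List Int × Bool × Int × Int) (curr : Int) : List Int × Bool × Int × Int :=
  match st with
  | (res, isStep, rem, s) =>
    if isStep then (res, false, curr, s)
    else if rem > 0 then
      if rem - 1 = 0 then (res ++ [s + curr], true, rem - 1, 0)
      else (res, false, rem - 1, s + curr)
    else st

def process_seq_and_generate_result (list_of_num_in_seq : List Int) : List Int :=
  (list_of_num_in_seq.foldl pvStepA ([], true, 0, 0)).1

-- ===== PORT B =====
-- B's cursor loop: read step, break on step <= 0, slice the group, sum a full group,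
-- advance the cursor by step.  The cursor is represented by the remaining suffix.
def pvAltLoop : List Int → List Int
  | [] => []
  | step :: rest =>
    if step ≤ 0 then []
    else
      let group := rest.take step.toNat
      if group.length = step.toNat then
        group.sum :: pvAltLoop (rest.drop step.toNat)
      else []
termination_by l => l.length
decreasing_by simp

def process_seq_and_generate_result_alt (list_of_num_in_seq : List Int) : List Int :=
  pvAltLoop list_of_num_in_seq

-- ===== PRECONDITION & SPEC =====
def Spec_process_seq_and_generate_result (list_of_num_in_seq : List Int) (out : List Int) : Prop := out = process_seq_and_generate_result_alt list_of_num_in_seq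
instance (list_of_num_in_seq : List Int) (out : List Int) : Decidable (Spec_process_seq_and_generate_result list_of_num_in_seq out) := by unfold Spec_process_seq_and_generate_result; infer_instance

-- ===== CLAIM (what is proved, stated in full; the proofs are below) =====
def Claim_equal_process_seq_and_generate_result : Prop := ∀ (list_of_num_in_seq : List Int), Dom_process_seq_and_generate_result list_of_num_in_seq → Spec_process_seq_and_generate_result list_of_num_in_seq (process_seq_and_generate_result list_of_num_in_seq)

-- ===== LEMMAS AND PROOFS =====

-- Once is_a_step is False with a non-positive remaining count, the state is frozen.
lemma pvFoldA_frozen (l : List Int) (res : List Int) (rem s : Int) (h : rem ≤ 0) :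
    l.foldl pvStepA (res, false, rem, s) = (res, false, rem, s) := by
  induction l with
  | nil => rfl
  | cons c t ih =>
    have : pvStepA (res, false, rem, s) c = (res, false, rem, s) := by
      simp [pvStepA]; omega
    simpa [List.foldl, this] using ih

-- Summing phase: with remaining count rem > 0 the fold consumes rem elements
-- (if available) and appends their sum plus the cache s.
lemma pvFoldA_sum (l : List Int) : ∀ (rem s : Int) (res : List Int), 0 < rem →
    (l.foldl pvStepA (res, false, rem, s)).1 =
      if rem.toNat ≤ l.length then
        ((l.drop rem.toNat).foldl pvStepA (res ++ [s + (l.take rem.toNat).sum], true, 0, 0)).1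
      else res := by
  induction l with
  | nil =>
    intro rem s res h
    rw [if_neg (by simp only [List.length_nil]; omega)]
    rfl
  | cons c t ih =>
    intro rem s res h
    by_cases h1 : rem = 1
    · subst h1
      have hs : pvStepA (res, false, 1, s) c = (res ++ [s + c], true, 0, 0) := by
        simp [pvStepA]
      rw [if_pos (by simp)]
      simp [List.foldl, hs]
    · have h2 : 1 < rem := by omega
      have hs : pvStepA (res, false, rem, s) c = (res, false, rem - 1, s + c) := by
        simp only [pvStepA]
        rw [if_neg (by simp), if_pos (by omega), if_neg (by omega)]
      have hk : rem.toNat = (rem - 1).toNat + 1 := by omega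
      rw [List.foldl_cons, hs, ih (rem - 1) (s + c) res (by omega)]
      rw [hk]
      by_cases hl : (rem - 1).toNat ≤ t.length
      · rw [if_pos hl, if_pos (by simp; omega)]
        simp [List.take_succ_cons, List.drop_succ_cons, add_assoc]
      · rw [if_neg hl, if_neg (by simp; omega)]

-- Unfolding equation of pvAltLoop on a cons cell.
lemma pvAltLoop_cons (step : Int) (rest : List Int) :
    pvAltLoop (step :: rest) =
      if step ≤ 0 then []
      else if (rest.take step.toNat).length = step.toNat then
        (rest.take step.toNat).sum :: pvAltLoop (rest.drop step.toNat)
      else [] := by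
  rw [pvAltLoop.eq_def]

-- Main invariant: from a fresh step-reading state the fold produces res ++ pvAltLoop l.
lemma pvMain (n : Nat) : ∀ (l : List Int), l.length ≤ n → ∀ (res : List Int),
    (l.foldl pvStepA (res, true, 0, 0)).1 = res ++ pvAltLoop l := by
  induction n with
  | zero =>
    intro l hl res
    have : l = [] := by cases l <;> simp_all
    subst this; simp [pvAltLoop.eq_def]
  | succ n ih =>
    intro l hl res
    cases l with
    | nil => simp [pvAltLoop.eq_def]
    | cons c t =>
      have hs : pvStepA (res, true, 0, 0) c = (res, false, c, 0) := by
        simp [pvStepA]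
      rw [List.foldl_cons, hs]
      by_cases hc : c ≤ 0
      · rw [pvFoldA_frozen t res c 0 hc]
        simp [pvAltLoop_cons, hc]
      · have hcpos : 0 < c := by omega
        rw [pvFoldA_sum t c 0 res hcpos]
        by_cases hl2 : c.toNat ≤ t.length
        · rw [if_pos hl2,
            ih (t.drop c.toNat) (by simp at hl ⊢; omega) (res ++ [0 + (t.take c.toNat).sum])]
          rw [pvAltLoop_cons, if_neg (by omega), if_pos (by simp [List.length_take]; omega)]
          simp
        · rw [if_neg hl2]
          rw [pvAltLoop_cons, if_neg (by omega), if_neg (by simp [List.length_take]; omega)]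
          simp

-- ===== VERDICT (by name: the statement is the Claim_ definition above) =====
theorem process_seq_and_generate_result_spec : Claim_equal_process_seq_and_generate_result := by
  intro l _
  unfold Spec_process_seq_and_generate_result process_seq_and_generate_result
    process_seq_and_generate_result_alt
  simpa using pvMain l.length l le_rfl []
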